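-- pv_equiv track=rewrite | github.com/LaljiSankhat/DSA | Practice/19_split_strings.py | splitString2
-- ===== SOURCE A (Python) =====
-- def splitString2(str):
--
--     def helper(s, unique_set):
--         if not s:
--             return 0
--
--         count = 0
--         for i in range(1, len(s) + 1):
--             substr = s[0:i]
--             if substr not in unique_set:
--                 unique_set.add(substr)
--                 count = max(count, 1 + helper(s[i:], unique_set))
--                 unique_set.remove(substr)
--         return count
--     return helper(str, set())
-- ===== SOURCE B (Python) =====
-- def splitString2(str):
--     # Character-by-character recursion: at each char either extend the current
--     # piece or cut it off (if unseen), with an immutable used-set passed down.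
--     def go(s, cur, used):
--         if not s:
--             return 0
--         piece = cur + s[0]
--         ext = go(s[1:], piece, used)
--         if piece not in used:
--             return max(ext, 1 + go(s[1:], '', used | {piece}))
--         return ext
--     return go(str, '', frozenset())
-- ===== Notes on version B (the rewrite author's own statement) =====
-- stated objective: alternative
-- what changed: Replaces A's backtracking over all prefix lengths per call (mutable set with add/remove) by a character-at-a-time recursion that at each position either extends the current piece or cuts it off, threading an immutable used-set.
import Mathlib
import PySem

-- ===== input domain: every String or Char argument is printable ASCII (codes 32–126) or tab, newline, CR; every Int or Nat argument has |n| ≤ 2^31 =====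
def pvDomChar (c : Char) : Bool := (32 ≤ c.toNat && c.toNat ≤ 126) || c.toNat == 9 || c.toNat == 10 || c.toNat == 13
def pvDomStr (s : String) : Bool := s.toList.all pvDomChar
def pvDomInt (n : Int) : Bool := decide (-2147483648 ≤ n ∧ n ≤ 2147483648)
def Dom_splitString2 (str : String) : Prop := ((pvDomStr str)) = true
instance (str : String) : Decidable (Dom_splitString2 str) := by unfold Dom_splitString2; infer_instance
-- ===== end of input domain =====

-- B replaces A's loop over all prefix lengths (with set add/remove backtracking) by a
-- character-at-a-time cut-or-extend recursion over an immutable used-set (objective: alternative).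

-- ===== PORT A =====
-- helper(s, unique_set): the string is ported as its character list; s[0:i] = take i, s[i:] = drop i;
-- unique_set.add/remove around the recursive call = passing 'PySem.Set.add u substr' to the call
-- (the set is restored after each call, exactly as the mutation is undone in Python).
def pvHelperA (s : List Char) (u : PySem.Set (List Char)) : Int :=
  if _h : s = [] then 0
  else
    (List.range' 1 s.length).attach.foldl
      (fun count i =>
        let substr := s.take i.1
        if substr ∈ u then count
        else max count (1 + pvHelperA (s.drop i.1) (PySem.Set.add u substr)))
      0
termination_by s.length
decreasing_by
  obtain ⟨j, hj, hij⟩ := List.mem_range'.mp i.2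
  have h0 : s ≠ [] := _h
  have : 0 < s.length := List.length_pos_iff.mpr h0
  simp only [List.length_drop]
  omega

def splitString2 (str : String) : Int :=
  pvHelperA str.toList PySem.Set.empty

-- ===== PORT B =====
-- go(s, cur, used): per character, either extend the current piece or (if unseen) cut it off.
def pvGoB : List Char → List Char → PySem.Set (List Char) → Int
  | [], _, _ => 0
  | c :: rest, cur, used =>
    let piece := cur ++ [c]
    let ext := pvGoB rest piece used
    if piece ∈ used then ext
    else max ext (1 + pvGoB rest [] (PySem.Set.union used [piece]))

def splitString2_alt (str : String) : Int :=
  pvGoB str.toList [] PySem.Set.empty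

-- ===== PRECONDITION & SPEC =====
def Spec_splitString2 (str : String) (out : Int) : Prop := out = splitString2_alt str
instance (str : String) (out : Int) : Decidable (Spec_splitString2 str out) := by unfold Spec_splitString2; infer_instance

-- ===== CLAIM (what is proved, stated in full; the proofs are below) =====
def Claim_equal_splitString2 : Prop := ∀ (str : String), Dom_splitString2 str → Spec_splitString2 str (splitString2 str)

-- ===== LEMMAS AND PROOFS =====

-- The A-side inner loop, as a plain fold with an extra pending prefix 'cur'.
def pvStep (s cur : List Char) (u : PySem.Set (List Char)) (count : Int) (i : Nat) : Int :=
  let substr := cur ++ s.take i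
  if substr ∈ u then count
  else max count (1 + pvHelperA (s.drop i) (PySem.Set.add u substr))

def pvFold (s cur : List Char) (u : PySem.Set (List Char)) : Int :=
  (List.range' 1 s.length).foldl (pvStep s cur u) 0

lemma pvHelperA_eq_fold (s : List Char) (u : PySem.Set (List Char)) :
    pvHelperA s u = pvFold s [] u := by
  rw [pvHelperA]
  by_cases h : s = []
  · simp [h, pvFold]
  · simp only [h, dite_false]
    rw [List.foldl_attach (l := List.range' 1 s.length)
      (f := fun count i => if s.take i ∈ u then count
        else max count (1 + pvHelperA (s.drop i) (PySem.Set.add u (s.take i)))), pvFold]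
    apply PySem.List.foldl_congr_mem
    intro count i _
    simp [pvStep]

lemma pvFoldl_max_out (P : Nat → Prop) [DecidablePred P] (g : Nat → Int) :
    ∀ (l : List Nat) (a b : Int),
      l.foldl (fun c i => if P i then max c (g i) else c) (max a b)
        = max a (l.foldl (fun c i => if P i then max c (g i) else c) b) := by
  intro l
  induction l with
  | nil => intro a b; simp
  | cons i l ih =>
    intro a b
    simp only [List.foldl_cons]
    have : (if P i then max (max a b) (g i) else max a b)
        = max a (if P i then max b (g i) else b) := by
      split_ifs with hp
      · rw [max_assoc]
      · rfl
    rw [this, ih]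

lemma pvGoB_eq_fold (s : List Char) :
    ∀ (cur : List Char) (u : PySem.Set (List Char)), pvGoB s cur u = pvFold s cur u := by
  induction s with
  | nil => intro cur u; simp [pvGoB, pvFold]
  | cons c rest ih =>
    intro cur u
    have hunion : ∀ (v : PySem.Set (List Char)) (x : List Char),
        PySem.Set.union v [x] = PySem.Set.add v x := by
      intro v x; rfl
    have hrange : List.range' 1 (c :: rest).length = 1 :: List.range' 2 rest.length := by
      simp [List.range'_succ]
    have hmap2 : List.range' 2 rest.length = (List.range' 1 rest.length).map (· + 1) := by
      rw [show (2 : Nat) = 1 + 1 from rfl, List.range'_succ_left]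
    have hstep : ∀ (count : Int) (i : Nat),
        pvStep (c :: rest) cur u count (i + 1) = pvStep rest (cur ++ [c]) u count i := by
      intro count i
      simp [pvStep, List.take_succ_cons, List.drop_succ_cons, List.append_assoc]
    have hfold :
        pvFold (c :: rest) cur u
          = (List.range' 1 rest.length).foldl (pvStep rest (cur ++ [c]) u)
              (pvStep (c :: rest) cur u 0 1) := by
      rw [pvFold, hrange, List.foldl_cons, hmap2, List.foldl_map]
      apply PySem.List.foldl_congr_mem
      intro a i _
      exact hstep a i
    have hfirst : pvStep (c :: rest) cur u 0 1
        = if cur ++ [c] ∈ u then 0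
          else max 0 (1 + pvHelperA rest (PySem.Set.add u (cur ++ [c]))) := by
      simp [pvStep]
    have hext : pvGoB rest (cur ++ [c]) u
        = (List.range' 1 rest.length).foldl (pvStep rest (cur ++ [c]) u) 0 := by
      rw [ih (cur ++ [c]) u, pvFold]
    have hcut : pvGoB rest [] (PySem.Set.add u (cur ++ [c]))
        = pvHelperA rest (PySem.Set.add u (cur ++ [c])) := by
      rw [ih [] (PySem.Set.add u (cur ++ [c])), ← pvHelperA_eq_fold]
    rw [pvGoB]
    simp only [hunion]
    rw [hfold, hfirst, hext, hcut]
    by_cases hmem : cur ++ [c] ∈ u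
    · simp only [hmem, if_true]
    · simp only [hmem, if_false]
      set X : Int := 1 + pvHelperA rest (PySem.Set.add u (cur ++ [c])) with hX
      have hP :
          (List.range' 1 rest.length).foldl (pvStep rest (cur ++ [c]) u) (max 0 X)
            = (List.range' 1 rest.length).foldl
                (fun co i => if ¬ (cur ++ [c]) ++ rest.take i ∈ u then
                    max co (1 + pvHelperA (rest.drop i)
                      (PySem.Set.add u ((cur ++ [c]) ++ rest.take i))) else co)
                (max X 0) := by
        rw [max_comm]
        apply PySem.List.foldl_congr_mem
        intro a i _
        simp only [pvStep]
        split_ifs <;> rfl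
      have hQ :
          (List.range' 1 rest.length).foldl (pvStep rest (cur ++ [c]) u) 0
            = (List.range' 1 rest.length).foldl
                (fun co i => if ¬ (cur ++ [c]) ++ rest.take i ∈ u then
                    max co (1 + pvHelperA (rest.drop i)
                      (PySem.Set.add u ((cur ++ [c]) ++ rest.take i))) else co)
                0 := by
        apply PySem.List.foldl_congr_mem
        intro a i _
        simp only [pvStep]
        split_ifs <;> rfl
      rw [hP,
        pvFoldl_max_out (fun i => ¬ (cur ++ [c]) ++ rest.take i ∈ u)
          (fun i => 1 + pvHelperA (rest.drop i) (PySem.Set.add u ((cur ++ [c]) ++ rest.take i)))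
          (List.range' 1 rest.length) X 0,
        hQ, max_comm]

-- ===== VERDICT (by name: the statement is the Claim_ definition above) =====
theorem splitString2_spec : Claim_equal_splitString2 := by
  intro str _
  unfold Spec_splitString2 splitString2 splitString2_alt
  rw [pvHelperA_eq_fold, pvGoB_eq_fold]
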